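-- pv_equiv track=rewrite | github.com/svgen83/favn | virus_titer.py | get_cumulative_for_dilutions
-- ===== SOURCE A (Python) =====
-- def get_cumulative_for_dilutions (rows,kind):
--     cumulative_list = []
--     i=0
--     for wells in zip(*rows): # wells - это вертикальные ряды
--         for well in wells:
--             if well == kind:
--                 i += 1
--         cumulative_list.append(i)
--     return cumulative_list
-- ===== SOURCE B (Python) =====
-- def get_cumulative_for_dilutions(rows, kind):
--     counts = [sum(w == kind for w in col) for col in zip(*rows)]
--     return [sum(counts[:j + 1]) for j in range(len(counts))]
-- ===== Notes on version B (the rewrite author's own statement) =====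
-- stated objective: simpler
-- what changed: Replaces the single loop with a mutating running counter by two declarative passes: per-column match counts, then prefix sums taken as sums of slices.
import Mathlib
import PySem

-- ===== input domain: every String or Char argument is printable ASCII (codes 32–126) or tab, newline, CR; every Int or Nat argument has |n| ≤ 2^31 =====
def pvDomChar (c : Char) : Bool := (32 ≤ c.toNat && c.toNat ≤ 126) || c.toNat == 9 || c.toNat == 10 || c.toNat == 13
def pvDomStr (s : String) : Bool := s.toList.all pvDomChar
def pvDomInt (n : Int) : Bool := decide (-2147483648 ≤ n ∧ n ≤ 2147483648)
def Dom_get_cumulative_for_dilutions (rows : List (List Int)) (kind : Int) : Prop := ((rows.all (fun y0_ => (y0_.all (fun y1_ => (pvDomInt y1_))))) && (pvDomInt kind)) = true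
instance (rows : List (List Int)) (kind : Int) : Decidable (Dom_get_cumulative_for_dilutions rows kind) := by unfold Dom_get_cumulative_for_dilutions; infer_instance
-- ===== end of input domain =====

-- B is a simpler two-pass decomposition (per-column counts, then prefix sums of slices)
-- of A's single loop with a mutating running counter; same return value everywhere.

-- zip(*rows): columns up to the shortest row's length (zip of no iterables is empty).
def pyZipStar (rows : List (List Int)) : List (List Int) :=
  let n := ((rows.map List.length).min?).getD 0
  (List.range n).map (fun j => rows.map (fun r => r.getD j 0))

-- ===== PORT A =====
def get_cumulative_for_dilutions (rows : List (List Int)) (kind : Int) : List Int :=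
  -- cumulative_list = []; i = 0; for wells in zip(*rows): for well in wells: …; append(i)
  ((pyZipStar rows).foldl
    (fun (st : List Int × Int) wells =>
      let i := wells.foldl (fun i well => if well == kind then i + 1 else i) st.2
      (st.1 ++ [i], i))
    ([], 0)).1

-- ===== PORT B =====
def get_cumulative_for_dilutions_alt (rows : List (List Int)) (kind : Int) : List Int :=
  -- counts = [sum(w == kind for w in col) for col in zip(*rows)]
  let counts := (pyZipStar rows).map
    (fun col => col.foldl (fun s w => s + (if w == kind then 1 else 0)) 0)
  -- [sum(counts[:j+1]) for j in range(len(counts))]; counts[:j+1] with 0 ≤ j is take (j+1)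
  (List.range counts.length).map
    (fun j => (counts.take (j + 1)).foldl (· + ·) 0)

-- ===== PRECONDITION & SPEC =====
def Spec_get_cumulative_for_dilutions (rows : List (List Int)) (kind : Int) (out : List Int) : Prop := out = get_cumulative_for_dilutions_alt rows kind
instance (rows : List (List Int)) (kind : Int) (out : List Int) : Decidable (Spec_get_cumulative_for_dilutions rows kind out) := by unfold Spec_get_cumulative_for_dilutions; infer_instance

-- ===== CLAIM (what is proved, stated in full; the proofs are below) =====
def Claim_equal_get_cumulative_for_dilutions : Prop := ∀ (rows : List (List Int)) (kind : Int), Dom_get_cumulative_for_dilutions rows kind → Spec_get_cumulative_for_dilutions rows kind (get_cumulative_for_dilutions rows kind)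

-- ===== LEMMAS AND PROOFS =====

-- common reference: running cumulative totals of a list of per-column counts
def pvCum (a : Int) : List Int → List Int
  | [] => []
  | x :: xs => (a + x) :: pvCum (a + x) xs

-- A's inner loop starting at i adds B's count of the column
theorem pvInnerA (kind : Int) (wells : List Int) : ∀ i : Int,
    wells.foldl (fun i well => if well == kind then i + 1 else i) i
      = i + wells.foldl (fun s w => s + (if w == kind then 1 else 0)) 0 := by
  induction wells with
  | nil => simp
  | cons w ws ih =>
    intro i
    simp only [List.foldl_cons]
    rw [ih, PySem.List.foldl_add (g := fun w => if w == kind then (1:Int) else 0),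
        PySem.List.foldl_add (g := fun w => if w == kind then (1:Int) else 0)]
    split <;> ring

theorem pvALoop (kind : Int) (cols : List (List Int)) : ∀ (acc : List Int) (i : Int),
    (cols.foldl
      (fun (st : List Int × Int) wells =>
        let i := wells.foldl (fun i well => if well == kind then i + 1 else i) st.2
        (st.1 ++ [i], i))
      (acc, i)).1
    = acc ++ pvCum i (cols.map (fun col => col.foldl (fun s w => s + (if w == kind then 1 else 0)) 0)) := by
  induction cols with
  | nil => simp [pvCum]
  | cons c cs ih =>
    intro acc i
    simp only [List.foldl_cons, List.map_cons, pvCum]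
    rw [pvInnerA, ih]
    simp

theorem pvSumCons (x : Int) (xs : List Int) :
    (x :: xs).foldl (· + ·) 0 = x + xs.foldl (· + ·) 0 := by
  have h : ∀ (l : List Int) (c : Int), l.foldl (· + ·) c = c + l.foldl (· + ·) 0 := by
    intro l
    induction l with
    | nil => simp
    | cons y ys ih => intro c; simp only [List.foldl_cons]; rw [ih, ih (0 + y)]; ring
  simp only [List.foldl_cons]; rw [h]; ring

theorem pvBLoop (counts : List Int) : ∀ a : Int,
    (List.range counts.length).map (fun j => a + (counts.take (j + 1)).foldl (· + ·) 0)
      = pvCum a counts := by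
  induction counts with
  | nil => simp [pvCum]
  | cons x xs ih =>
    intro a
    simp only [List.length_cons, List.range_succ_eq_map, List.map_cons, List.map_map]
    rw [pvCum]
    congr 1
    · simp
    · rw [← ih (a + x)]
      apply List.map_congr_left
      intro j _
      simp only [Function.comp_apply, List.take_succ_cons, pvSumCons, Nat.succ_eq_add_one]
      ring_nf

-- ===== VERDICT (by name: the statement is the Claim_ definition above) =====
theorem get_cumulative_for_dilutions_spec : Claim_equal_get_cumulative_for_dilutions := by
  intro rows kind _
  unfold Spec_get_cumulative_for_dilutions
  unfold get_cumulative_for_dilutions get_cumulative_for_dilutions_alt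
  rw [pvALoop]
  rw [← pvBLoop _ 0]
  simp
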